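-- pv_equiv track=rewrite | github.com/Zephyrion-Yuan/AntibodyPipeline | scripts/plasmid_mix.py | split_plate_to_quarters
-- ===== SOURCE A (Python) =====
-- def split_plate_to_quarters(plate_data, sheet_name):
--     """
--     plate_data: 长度96的list，列优先填充（8行12列）
--     返回: dict {f"{sheet_name}_{num}": 4x6子板list, ...}
--     """
--     # 转为8x12的二维数组，列优先
--     arr = [["" for _ in range(12)] for _ in range(8)]
--     idx = 0
--     for col in range(12):
--         for row in range(8):
--             arr[row][col] = plate_data[idx] if idx < len(plate_data) else ""
--             idx += 1
--
--     # 按4x6切成4块，编号从左上顺时针或从左到右、上到下都可以，这里默认左上-右上-左下-右下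
--     blocks = {}
--     coords = [
--         (0, 0),   # 左上起点
--         (4, 0),   # 左下起点
--         (0, 6),   # 右上起点
--         (4, 6),   # 右下起点
--     ]
--     for num, (r0, c0) in enumerate(coords, 1):
--         block = []
--         for col in range(c0, c0 + 6):
--             for row in range(r0, r0 + 4):
--                 block.append(arr[row][col])
--         blocks[f"{sheet_name}_{num}"] = block
--
--     return blocks
-- ===== SOURCE B (Python) =====
-- def split_plate_to_quarters(plate_data, sheet_name):
--     """Single forward scatter pass: no 8x12 intermediate array."""
--     q1, q2, q3, q4 = [], [], [], []
--     n = len(plate_data)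
--     for col in range(12):
--         left = col < 6
--         for row in range(8):
--             idx = col * 8 + row
--             val = plate_data[idx] if idx < n else ""
--             if left:
--                 (q1 if row < 4 else q2).append(val)
--             else:
--                 (q3 if row < 4 else q4).append(val)
--     return {f"{sheet_name}_{i}": q for i, q in enumerate((q1, q2, q3, q4), 1)}
-- ===== Notes on version B (the rewrite author's own statement) =====
-- stated objective: simpler
-- what changed: B drops A's 8x12 intermediate array entirely and does one forward column-major scatter pass, routing each value directly to one of four quadrant lists by its (row, col) coordinates.
import Mathlib
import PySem

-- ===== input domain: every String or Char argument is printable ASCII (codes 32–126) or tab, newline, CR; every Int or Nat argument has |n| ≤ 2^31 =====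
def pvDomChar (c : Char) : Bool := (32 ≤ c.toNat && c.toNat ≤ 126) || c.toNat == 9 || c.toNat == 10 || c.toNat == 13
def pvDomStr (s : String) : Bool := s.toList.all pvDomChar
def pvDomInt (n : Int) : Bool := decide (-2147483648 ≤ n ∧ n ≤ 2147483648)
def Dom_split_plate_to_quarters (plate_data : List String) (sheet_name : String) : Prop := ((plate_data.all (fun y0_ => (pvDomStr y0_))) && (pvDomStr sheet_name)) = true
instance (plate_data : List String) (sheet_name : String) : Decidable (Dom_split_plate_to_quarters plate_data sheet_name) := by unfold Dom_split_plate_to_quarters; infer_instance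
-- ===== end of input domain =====

-- ===== PORT A =====
-- B drops A's 8x12 intermediate array and does one forward scatter pass (objective: simpler).
-- range(n)/range(a,b) over nonnegative literals are ported as List.range / List.range' (exact there);
-- plate_data[idx] is ported as getD under the very bound check the Python performs, so it is exact.
def split_plate_to_quarters (plate_data : List String) (sheet_name : String) : List (String × List String) :=
  let arr0 : List (List String) := List.replicate 8 (List.replicate 12 "")
  -- the running idx always equals col*8+row, transliterated as such
  let arr := (List.range 12).foldl (fun arr col =>
      (List.range 8).foldl (fun arr row =>
        let idx := col * 8 + row
        arr.modify row (fun r =>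
          r.set col (if idx < plate_data.length then plate_data.getD idx "" else ""))) arr) arr0
  let coords : List (Nat × Nat) := [(0, 0), (4, 0), (0, 6), (4, 6)]
  ((coords.zipIdx 1).foldl (fun blocks rc =>
      PySem.Dict.insert blocks (sheet_name ++ "_" ++ PySem.Int.toStr (rc.2 : Int))
        ((List.range' rc.1.2 6).foldl (fun block col =>
          (List.range' rc.1.1 4).foldl (fun block row =>
            block ++ [(arr.getD row []).getD col ""]) block) []))
    (PySem.Dict.empty : PySem.Dict String (List String))).items

-- ===== PORT B =====
def split_plate_to_quarters_alt (plate_data : List String) (sheet_name : String) : List (String × List String) :=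
  let n := plate_data.length
  let qs := (List.range 12).foldl (fun (qs : List String × List String × List String × List String) col =>
      let left := col < 6
      (List.range 8).foldl (fun qs row =>
        let idx := col * 8 + row
        let val := if idx < n then plate_data.getD idx "" else ""
        if left then
          if row < 4 then (qs.1 ++ [val], qs.2.1, qs.2.2.1, qs.2.2.2)
          else (qs.1, qs.2.1 ++ [val], qs.2.2.1, qs.2.2.2)
        else
          if row < 4 then (qs.1, qs.2.1, qs.2.2.1 ++ [val], qs.2.2.2)
          else (qs.1, qs.2.1, qs.2.2.1, qs.2.2.2 ++ [val])) qs)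
    (([], [], [], []) : List String × List String × List String × List String)
  ([qs.1, qs.2.1, qs.2.2.1, qs.2.2.2].zipIdx 1).map (fun qi =>
    (sheet_name ++ "_" ++ PySem.Int.toStr (qi.2 : Int), qi.1))

-- ===== PRECONDITION & SPEC =====
def Spec_split_plate_to_quarters (plate_data : List String) (sheet_name : String) (out : List (String × List String)) : Prop := out = split_plate_to_quarters_alt plate_data sheet_name
instance (plate_data : List String) (sheet_name : String) (out : List (String × List String)) : Decidable (Spec_split_plate_to_quarters plate_data sheet_name out) := by unfold Spec_split_plate_to_quarters; infer_instance

-- ===== CLAIM (what is proved, stated in full; the proofs are below) =====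
def Claim_equal_split_plate_to_quarters : Prop := ∀ (plate_data : List String) (sheet_name : String), Dom_split_plate_to_quarters plate_data sheet_name → Spec_split_plate_to_quarters plate_data sheet_name (split_plate_to_quarters plate_data sheet_name)

-- ===== LEMMAS AND PROOFS =====

-- String append is left-cancellative (used to show the four block keys are distinct).
theorem pv_append_ne (s a b : String) (h : a ≠ b) : s ++ a ≠ s ++ b := by
  intro he
  apply h
  have ht := congrArg String.toList he
  simp only [String.toList_append] at ht
  have := List.append_cancel_left ht
  exact String.toList_injective this

-- ===== VERDICT (by name: the statement is the Claim_ definition above) =====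
set_option maxRecDepth 100000 in
set_option maxHeartbeats 4000000 in
theorem split_plate_to_quarters_spec : Claim_equal_split_plate_to_quarters := by
  intro plate_data sheet_name _
  unfold Spec_split_plate_to_quarters split_plate_to_quarters split_plate_to_quarters_alt
  rw [PySem.Dict.items_foldl_insert_fresh]
  · rfl
  · intro a _
    exact PySem.Dict.contains_empty _
  · show (List.map _ [((0, 0), 1), ((4, 0), 2), ((0, 6), 3), ((4, 6), 4)]).Nodup
    simp only [List.map_cons, List.map_nil, List.nodup_cons, List.mem_cons,
      List.nodup_nil, and_true, List.mem_nil_iff]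
    push Not
    repeat' apply And.intro
    all_goals first
      | trivial
      | exact pv_append_ne _ _ _ (by decide)
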